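-- pv_equiv track=rewrite | github.com/jasuzlasu/matura2021 | punkty.py | szukaj_wewnatrz_kwadratu
-- ===== SOURCE A (Python) =====
-- def szukaj_wewnatrz_kwadratu(dane: list[list[int]]) -> list[int]:
--     wewnatrz = 0
--     na_bokach = 0
--     na_zewnatrz = 0
--     for x, y in dane:
--         if x < 5000 and y < 5000:
--             wewnatrz += 1
--         elif x == 5000 or y == 5000:
--             na_bokach += 1
--         else:
--             na_zewnatrz += 1
--     return [wewnatrz, na_bokach, na_zewnatrz]
-- ===== SOURCE B (Python) =====
-- def szukaj_wewnatrz_kwadratu(dane: list[list[int]]) -> list[int]: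
--     wewnatrz = sum(1 for x, y in dane if x < 5000 and y < 5000)
--     na_bokach = sum(1 for x, y in dane if x == 5000 or y == 5000)
--     na_zewnatrz = len(dane) - wewnatrz - na_bokach
--     return [wewnatrz, na_bokach, na_zewnatrz]
-- ===== Notes on version B (the rewrite author's own statement) =====
-- stated objective: simpler
-- what changed: Replaces the single three-way if/elif/else loop over mutable counters with two independent filtered counts (inside, boundary) and derives the outside count by complementary subtraction from len(dane), valid since the inside and boundary conditions are mutually exclusive.
import Mathlib
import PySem

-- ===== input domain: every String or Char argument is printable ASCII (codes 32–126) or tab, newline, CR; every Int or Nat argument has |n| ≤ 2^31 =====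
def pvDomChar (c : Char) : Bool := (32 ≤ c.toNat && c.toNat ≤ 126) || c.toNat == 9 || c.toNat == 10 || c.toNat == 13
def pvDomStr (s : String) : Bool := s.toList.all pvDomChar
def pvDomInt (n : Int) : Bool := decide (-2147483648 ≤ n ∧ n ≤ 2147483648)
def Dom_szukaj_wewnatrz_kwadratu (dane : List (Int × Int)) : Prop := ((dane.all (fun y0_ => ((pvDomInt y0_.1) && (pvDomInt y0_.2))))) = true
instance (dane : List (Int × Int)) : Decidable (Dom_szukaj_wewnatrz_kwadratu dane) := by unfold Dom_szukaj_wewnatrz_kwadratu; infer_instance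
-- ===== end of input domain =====

-- B replaces A's three-way if/elif/else loop by two filtered counts and a
-- complementary subtraction for the outside count (objective: simpler).

-- ===== PORT A =====
def szukaj_wewnatrz_kwadratu (dane : List (Int × Int)) : List Int :=
  let s := dane.foldl (fun (acc : Int × Int × Int) p =>
    let (w, b, z) := acc
    let (x, y) := p
    if x < 5000 && y < 5000 then (w + 1, b, z)
    else if x == 5000 || y == 5000 then (w, b + 1, z)
    else (w, b, z + 1)) (0, 0, 0)
  [s.1, s.2.1, s.2.2]

-- ===== PORT B =====
def szukaj_wewnatrz_kwadratu_alt (dane : List (Int × Int)) : List Int :=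
  let wewnatrz : Int := (dane.countP (fun p => p.1 < 5000 && p.2 < 5000) : Nat)
  let na_bokach : Int := (dane.countP (fun p => p.1 == 5000 || p.2 == 5000) : Nat)
  let na_zewnatrz : Int := (dane.length : Int) - wewnatrz - na_bokach
  [wewnatrz, na_bokach, na_zewnatrz]

-- ===== PRECONDITION & SPEC =====
def Spec_szukaj_wewnatrz_kwadratu (dane : List (Int × Int)) (out : List Int) : Prop := out = szukaj_wewnatrz_kwadratu_alt dane
instance (dane : List (Int × Int)) (out : List Int) : Decidable (Spec_szukaj_wewnatrz_kwadratu dane out) := by unfold Spec_szukaj_wewnatrz_kwadratu; infer_instance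

-- ===== CLAIM =====
def Claim_equal_szukaj_wewnatrz_kwadratu : Prop := ∀ (dane : List (Int × Int)), Dom_szukaj_wewnatrz_kwadratu dane → Spec_szukaj_wewnatrz_kwadratu dane (szukaj_wewnatrz_kwadratu dane)

-- ===== LEMMAS AND PROOFS =====
-- A's fold from an arbitrary start state, characterised by B's counts.
theorem pvFoldA_char (dane : List (Int × Int)) (w b z : Int) :
    dane.foldl (fun (acc : Int × Int × Int) p =>
      let (w, b, z) := acc
      let (x, y) := p
      if x < 5000 && y < 5000 then (w + 1, b, z)
      else if x == 5000 || y == 5000 then (w, b + 1, z)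
      else (w, b, z + 1)) (w, b, z)
    = (w + (dane.countP (fun p => p.1 < 5000 && p.2 < 5000) : Nat),
       b + (dane.countP (fun p => p.1 == 5000 || p.2 == 5000) : Nat),
       z + ((dane.length : Int)
            - (dane.countP (fun p => p.1 < 5000 && p.2 < 5000) : Nat)
            - (dane.countP (fun p => p.1 == 5000 || p.2 == 5000) : Nat))) := by
  induction dane generalizing w b z with
  | nil => simp
  | cons hd tl ih =>
    obtain ⟨x, y⟩ := hd
    simp only [List.foldl_cons, List.countP_cons, List.length_cons]
    by_cases h1 : x < 5000 ∧ y < 5000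
    · have hx : ¬ (x == 5000 || y == 5000) = true := by
        simp; omega
      simp only [h1.1, h1.2, decide_true, Bool.and_self, if_true]
      rw [ih]
      simp [hx]
      ring
    · have hA : ¬ ((decide (x < 5000) && decide (y < 5000)) = true) := by
        simp; omega
      rw [if_neg hA]
      by_cases h2 : x = 5000 ∨ y = 5000
      · have hB : (x == 5000 || y == 5000) = true := by
          simp; omega
        rw [if_pos hB, ih]
        simp [hA, hB]
        refine ⟨by ring, by ring⟩
      · have hB : ¬ ((x == 5000 || y == 5000) = true) := by
          simp; omega
        rw [if_neg hB, ih]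
        simp [hA, hB]
        ring

-- ===== VERDICT =====
theorem szukaj_wewnatrz_kwadratu_spec : Claim_equal_szukaj_wewnatrz_kwadratu := by
  intro dane _
  unfold Spec_szukaj_wewnatrz_kwadratu szukaj_wewnatrz_kwadratu szukaj_wewnatrz_kwadratu_alt
  rw [pvFoldA_char]
  simp
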